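-- pv_equiv track=rewrite | github.com/AkiroKazuki/BISINDO | bisindo-emergency/ml/graph.py | get_hand_edges
-- ===== SOURCE A (Python) =====
-- def get_hand_edges(offset: int = 0) -> list:
--     """MediaPipe Hand connections (21 nodes per hand).
--
--     Wrist → each finger base, then finger base → tip sequentially.
--
--     Args:
--         offset: Index offset (33 for left hand, 54 for right hand).
--     """
--     edges = [
--         # Wrist to finger bases
--         (0, 1), (0, 5), (0, 9), (0, 13), (0, 17),
--         # Thumb
--         (1, 2), (2, 3), (3, 4),
--         # Index
--         (5, 6), (6, 7), (7, 8),
--         # Middle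
--         (9, 10), (10, 11), (11, 12),
--         # Ring
--         (13, 14), (14, 15), (15, 16),
--         # Pinky
--         (17, 18), (18, 19), (19, 20),
--     ]
--     return [(i + offset, j + offset) for i, j in edges]
-- ===== SOURCE B (Python) =====
-- def get_hand_edges(offset: int = 0) -> list:
--     """Derive the MediaPipe hand edges from the finger structure.
--
--     Wrist -> each finger base, then each finger's three-link chain.
--     """
--     bases = [1, 5, 9, 13, 17]
--     edges = []
--     for base in bases:
--         edges.append((0 + offset, base + offset))
--     for base in bases:
--         for k in range(3):
--             edges.append((base + k + offset, base + k + 1 + offset))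
--     return edges
-- ===== Notes on version B (the rewrite author's own statement) =====
-- stated objective: simpler
-- what changed: B derives the edge list from the five finger bases with two loops (wrist-to-base edges, then each finger's three-link chain) instead of remapping a hard-coded list of edge tuples.
import Mathlib
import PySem

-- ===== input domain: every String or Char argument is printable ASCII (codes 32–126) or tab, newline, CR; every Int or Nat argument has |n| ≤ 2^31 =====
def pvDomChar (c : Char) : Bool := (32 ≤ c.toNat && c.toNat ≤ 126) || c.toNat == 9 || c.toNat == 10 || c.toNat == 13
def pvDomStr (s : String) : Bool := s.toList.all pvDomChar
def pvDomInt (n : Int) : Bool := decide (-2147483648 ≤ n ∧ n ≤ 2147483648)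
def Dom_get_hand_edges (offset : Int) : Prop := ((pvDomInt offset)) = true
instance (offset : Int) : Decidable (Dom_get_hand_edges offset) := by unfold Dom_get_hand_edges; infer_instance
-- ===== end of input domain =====

-- ===== PORT A =====
-- B derives the edges from the finger structure; A remaps a hard-coded list.
def get_hand_edges (offset : Int) : List (Int × Int) :=
  let edges : List (Int × Int) :=
    [(0, 1), (0, 5), (0, 9), (0, 13), (0, 17),
     (1, 2), (2, 3), (3, 4),
     (5, 6), (6, 7), (7, 8),
     (9, 10), (10, 11), (11, 12),
     (13, 14), (14, 15), (15, 16),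
     (17, 18), (18, 19), (19, 20)]
  edges.map (fun p => (p.1 + offset, p.2 + offset))

-- ===== PORT B =====
def pvBases : List Int := [1, 5, 9, 13, 17]

def get_hand_edges_alt (offset : Int) : List (Int × Int) :=
  let edges := pvBases.foldl (fun acc base => acc ++ [(0 + offset, base + offset)]) []
  pvBases.foldl (fun acc base =>
    (PySem.List.pyRange 0 3 1).foldl
      (fun acc2 k => acc2 ++ [(base + k + offset, base + k + 1 + offset)]) acc) edges

-- ===== PRECONDITION & SPEC =====
def Spec_get_hand_edges (offset : Int) (out : List (Int × Int)) : Prop := out = get_hand_edges_alt offset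
instance (offset : Int) (out : List (Int × Int)) : Decidable (Spec_get_hand_edges offset out) := by unfold Spec_get_hand_edges; infer_instance

-- ===== CLAIM (what is proved, stated in full; the proofs are below) =====
def Claim_equal_get_hand_edges : Prop := ∀ (offset : Int), Dom_get_hand_edges offset → Spec_get_hand_edges offset (get_hand_edges offset)

-- ===== LEMMAS AND PROOFS =====

-- ===== VERDICT (by name: the statement is the Claim_ definition above) =====
theorem get_hand_edges_spec : Claim_equal_get_hand_edges := by
  intro offset _
  unfold Spec_get_hand_edges get_hand_edges get_hand_edges_alt pvBases
  simp [PySem.List.pyRange, List.foldl]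
  norm_num [List.range_succ]
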